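-- pv_equiv track=rewrite | github.com/yash1529/PythonProjects | grammar_rectify_error.py | record
-- ===== SOURCE A (Python) =====
-- def record(display):
--     """To track record of words and char in a string"""
--     withspace=len(display)
--     withoutspace=0
--     for i in display:#to count no of char without whitespaces
--         if i==" ":#space
--             pass
--         else:withoutspace+=1 #add 1 if char is found
--
--     """to count no of words in a string"""
--     k=word=0
--     flag=True #becomes false if no space is found
--     for i in display :
--         #count only when space no space is found
--         if flag==False and display[k]==" ":
--             word+=1
--         #if a space if found take flag as true
--         if display[k]==" ":#space
--             flag=True
--         else:
--             flag=False
--         k+=1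
--     return (withspace-1,withoutspace,word+1)
-- ===== SOURCE B (Python) =====
-- def record(display):
--     """To track record of words and char in a string"""
--     parts = display.split(' ')
--     return (len(display) - 1,
--             sum(len(p) for p in parts),
--             sum(1 for p in parts[:-1] if p) + 1)
-- ===== Notes on version B (the rewrite author's own statement) =====
-- stated objective: simpler
-- what changed: Replaces A's two per-character loops (a counter and an index-driven boolean-flag state machine over display[k]) by a single split on the space character: the non-space count is the sum of the parts' lengths and the word count is the number of nonempty parts before the last, plus 1.
import Mathlib
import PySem

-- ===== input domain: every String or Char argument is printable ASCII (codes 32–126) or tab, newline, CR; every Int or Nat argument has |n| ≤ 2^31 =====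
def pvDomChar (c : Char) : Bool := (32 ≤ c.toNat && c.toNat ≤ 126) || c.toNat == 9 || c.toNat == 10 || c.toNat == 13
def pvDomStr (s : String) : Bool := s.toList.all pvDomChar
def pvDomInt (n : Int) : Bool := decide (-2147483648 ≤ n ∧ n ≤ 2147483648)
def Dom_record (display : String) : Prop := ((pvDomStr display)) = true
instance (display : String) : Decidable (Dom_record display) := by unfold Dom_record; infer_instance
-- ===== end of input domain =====

-- B replaces A's two per-char loops (counter + index-driven boolean-flag state machine) by one
-- display.split(' ') and folds over its parts; objective: simpler. Return value only; no mutation.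

-- ===== PORT A =====
-- A's second loop: 'for i in display' while indexing display[k]; state (k, flag, word).
def record (display : String) : Int × Int × Int :=
  let withspace : Int := (PySem.Str.len display : Int)
  let withoutspace : Int :=
    display.toList.foldl (fun acc i => if i == ' ' then acc else acc + 1) 0
  let st :=
    display.toList.foldl
      (fun (st : Int × Bool × Int) _i =>
        let k := st.1
        let flag := st.2.1
        let word := st.2.2
        let word := if flag == false && (PySem.List.pyGet? display.toList k == some ' ')
                    then word + 1 else word
        let flag := if PySem.List.pyGet? display.toList k == some ' ' then true else false
        (k + 1, flag, word))
      (0, true, 0)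
  (withspace - 1, withoutspace, st.2.2 + 1)

-- ===== PORT B =====
-- B: parts = display.split(' '); (len-1, sum of part lengths, nonempty parts among parts[:-1] + 1)
def record_alt (display : String) : Int × Int × Int :=
  let parts := PySem.Chars.splitOn display.toList [' ']
  ((PySem.Str.len display : Int) - 1,
   (parts.map (fun p => (p.length : Int))).sum,
   ((parts.dropLast.countP (fun p => !p.isEmpty)) : Int) + 1)

-- ===== PRECONDITION & SPEC =====
def Spec_record (display : String) (out : Int × Int × Int) : Prop := out = record_alt display
instance (display : String) (out : Int × Int × Int) : Decidable (Spec_record display out) := by unfold Spec_record; infer_instance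

-- ===== CLAIM (what is proved, stated in full; the proofs are below) =====
def Claim_equal_record : Prop := ∀ (display : String), Dom_record display → Spec_record display (record display)

-- ===== LEMMAS AND PROOFS =====

-- Abstract word counter: A's flag loop with the index resolved to the current character.
def pvW : Bool → List Char → Int
  | _, [] => 0
  | flag, c :: rest => (if flag = false ∧ c = ' ' then 1 else 0) + pvW (c == ' ') rest

-- Simple structural recursion equivalent to split(' '): pre is the current (in-order) piece.
def pvParts : List Char → List Char → List (List Char)
  | pre, [] => [pre]
  | pre, c :: t => if c = ' ' then pre :: pvParts [] t else pvParts (pre ++ [c]) t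

-- A's non-space loop counts the characters that are not ' '.
lemma loopNS (cs : List Char) : ∀ (a : Int),
    cs.foldl (fun acc i => if i == ' ' then acc else acc + 1) a
      = a + (cs.length : Int) - (cs.count ' ' : Int) := by
  induction cs with
  | nil => intro a; simp
  | cons c t ih =>
    intro a
    rw [List.foldl_cons]
    by_cases h : c = ' '
    · rw [if_pos (by simp [h]), ih]
      simp only [h, List.count_cons_self, List.length_cons]
      push_cast; ring_nf
    · rw [if_neg (by simp [h]), ih]
      simp [h]
      ring

-- A's index loop, generalized over a processed prefix, equals the abstract counter pvW.
lemma loopA_eq (full : List Char) : ∀ (l p : List Char) (flag : Bool) (word : Int),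
    full = p ++ l →
    (l.foldl
      (fun (st : Int × Bool × Int) _i =>
        let k := st.1
        let flag := st.2.1
        let word := st.2.2
        let word := if flag == false && (PySem.List.pyGet? full k == some ' ')
                    then word + 1 else word
        let flag := if PySem.List.pyGet? full k == some ' ' then true else false
        (k + 1, flag, word))
      ((p.length : Int), flag, word)).2.2 = word + pvW flag l := by
  intro l
  induction l with
  | nil => intro p flag word _; simp [pvW]
  | cons c t ih =>
    intro p flag word hfull
    have hget : PySem.List.pyGet? full (p.length : Int) = some c := by
      rw [hfull]; exact PySem.List.pyGet?_append_length p t c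
    have hfull' : full = (p ++ [c]) ++ t := by simp [hfull]
    have hlen : ((p ++ [c]).length : Int) = (p.length : Int) + 1 := by simp
    simp only [List.foldl_cons, hget]
    have := ih (p ++ [c])
      (if (some c == some (' ' : Char)) = true then true else false)
      (if (flag == false && (some c == some (' ' : Char))) = true then word + 1 else word)
      hfull'
    rw [hlen] at this
    rw [this]
    by_cases hc : c = ' '
    · subst hc
      by_cases hf : flag = false <;> (simp [pvW, hf]; try ring)
    · have hb : (c == ' ') = false := beq_eq_false_iff_ne.mpr hc
      by_cases hf : flag = false <;> (simp [pvW, hc, hf, hb]; try ring)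

-- splitOn with sep " " is the simple recursion pvParts.
lemma splitOn_go_eq : ∀ (fuel : Nat) (l cur : List Char) (acc : List (List Char)),
    l.length ≤ fuel →
    PySem.Chars.splitOn.go [' '] fuel l cur acc = acc.reverse ++ pvParts cur.reverse l := by
  intro fuel
  induction fuel with
  | zero =>
    intro l cur acc h
    have : l = [] := List.eq_nil_of_length_eq_zero (Nat.le_zero.mp h)
    subst this
    simp [PySem.Chars.splitOn.go, pvParts]
  | succ m ih =>
    intro l cur acc h
    cases l with
    | nil => simp [PySem.Chars.splitOn.go, pvParts]
    | cons c rest =>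
      have h' : rest.length ≤ m := by simpa using h
      by_cases hc : c = ' '
      · have hpre : List.isPrefixOf [' '] (c :: rest) = true := by simp [List.isPrefixOf, hc]
        rw [show PySem.Chars.splitOn.go [' '] (m + 1) (c :: rest) cur acc
              = PySem.Chars.splitOn.go [' '] m rest [] (cur.reverse :: acc) from by
            simp [PySem.Chars.splitOn.go, hpre]]
        rw [ih rest [] (cur.reverse :: acc) h']
        simp [pvParts, hc]
      · have hpre : List.isPrefixOf [' '] (c :: rest) = false := by
          simp [List.isPrefixOf]; exact fun hx => absurd hx.symm hc
        rw [show PySem.Chars.splitOn.go [' '] (m + 1) (c :: rest) cur acc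
              = PySem.Chars.splitOn.go [' '] m rest (c :: cur) acc from by
            simp [PySem.Chars.splitOn.go, hpre]]
        rw [ih rest (c :: cur) acc h']
        simp [pvParts, hc]

lemma splitOn_eq_pvParts (cs : List Char) :
    PySem.Chars.splitOn cs [' '] = pvParts [] cs := by
  unfold PySem.Chars.splitOn
  simpa using splitOn_go_eq (cs.length + 1) cs [] [] (by omega)

-- The parts contain exactly the non-space characters.
lemma sum_lengths (cs : List Char) : ∀ (pre : List Char),
    ((pvParts pre cs).map (fun p => (p.length : Int))).sum
      = (pre.length : Int) + (cs.length : Int) - (cs.count ' ' : Int) := by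
  induction cs with
  | nil => intro pre; simp [pvParts]
  | cons c t ih =>
    intro pre
    by_cases hc : c = ' '
    · simp only [pvParts, if_pos hc, List.map_cons, List.sum_cons, ih []]
      simp [hc]
      ring
    · simp only [pvParts, if_neg hc, ih (pre ++ [c])]
      simp [hc]
      ring

-- pvParts is never empty (needed to peel dropLast through a cons).
lemma pvParts_ne_nil (cs : List Char) : ∀ (pre : List Char), pvParts pre cs ≠ [] := by
  induction cs with
  | nil => intro pre; simp [pvParts]
  | cons c t ih =>
    intro pre
    by_cases hc : c = ' ' <;> simp [pvParts, hc, ih]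

-- Nonempty parts among parts[:-1] are exactly pvW's transitions; the flag is 'pre is empty'.
lemma words_eq (cs : List Char) : ∀ (pre : List Char),
    (((pvParts pre cs).dropLast.countP (fun p => !p.isEmpty)) : Int) = pvW pre.isEmpty cs := by
  induction cs with
  | nil => intro pre; simp [pvParts, pvW]
  | cons c t ih =>
    intro pre
    by_cases hc : c = ' '
    · rw [show pvParts pre (c :: t) = pre :: pvParts [] t from by simp [pvParts, hc]]
      rw [List.dropLast_cons_of_ne_nil (pvParts_ne_nil t [])]
      rw [List.countP_cons]
      subst hc
      by_cases hp : pre = []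
      · subst hp; simpa [pvW] using ih []
      · have : pre.isEmpty = false := by simpa [List.isEmpty_iff] using hp
        rw [this]
        simp only [pvW]
        have h2 := ih []
        simp only [List.isEmpty_nil] at h2
        simp [h2]
        ring
    · rw [show pvParts pre (c :: t) = pvParts (pre ++ [c]) t from by simp [pvParts, hc]]
      rw [ih (pre ++ [c])]
      have hb : (c == ' ') = false := beq_eq_false_iff_ne.mpr hc
      have hne : (pre ++ [c]).isEmpty = false := by simp
      simp [pvW, hc, hb, hne]

-- ===== VERDICT (by name: the statement is the Claim_ definition above) =====
theorem record_spec : Claim_equal_record := by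
  intro display _
  unfold Spec_record record record_alt
  have hA := loopA_eq display.toList display.toList [] true 0 rfl
  simp only [List.length_nil, Nat.cast_zero] at hA
  have hns := loopNS display.toList 0
  have hsum := sum_lengths display.toList []
  have hwords := words_eq display.toList []
  simp only [List.isEmpty_nil, List.length_nil, Nat.cast_zero, zero_add] at hsum hwords
  simp only [PySem.Str.len_eq, splitOn_eq_pvParts, hA, hns, hsum, hwords, zero_add]
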